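-- pv_equiv track=rewrite | github.com/SWORDHealth/nvidia-rl | nemo_rl/data/llm_message_utils.py | get_message_boundary_index
-- ===== SOURCE A (Python) =====
-- def get_message_boundary_index(prev_msg: str, full_msg: str) -> int:
--     """Find message boundary using only boundary markers."""
--     if len(prev_msg) == 0:
--         return 0
--
--     # Check for endoftext marker - if present, everything after it is a new conversation
--     endoftext_pos = full_msg.find("<|endoftext|>")
--     if endoftext_pos != -1:
--         # Find the first boundary marker after endoftext
--         after_endoftext = full_msg[endoftext_pos + len("<|endoftext|>"):]
--         marker_in_new_conversation = after_endoftext.find("<|im_start|>")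
--         if marker_in_new_conversation != -1:
--             return endoftext_pos + len("<|endoftext|>") + marker_in_new_conversation
--
--     # Find all boundary markers in the full message
--     boundary_markers = ["<|im_start|>"]
--     marker_positions = []
--
--     for marker in boundary_markers:
--         pos = 0
--         while True:
--             pos = full_msg.find(marker, pos)
--             if pos == -1:
--                 break
--             marker_positions.append((pos, marker))
--             pos += len(marker)
--
--     # Sort positions and find the first marker that appears near or after the expected previous message end
--     marker_positions.sort()
--     expected_prev_end = len(prev_msg)
--
--     # Allow some tolerance (within 20 chars) for minor formatting differences
--     tolerance = 20
--
--     for pos, marker in marker_positions: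
--         if pos >= expected_prev_end - tolerance:
--             return pos
--
--     return len(prev_msg)
-- ===== SOURCE B (Python) =====
-- def get_message_boundary_index(prev_msg: str, full_msg: str) -> int:
--     """Find message boundary using only boundary markers."""
--     if len(prev_msg) == 0:
--         return 0
--     # endoftext: everything after it is a new conversation (unchanged behaviour,
--     # but using find-with-start instead of slicing)
--     endoftext_pos = full_msg.find("<|endoftext|>")
--     if endoftext_pos != -1:
--         m = full_msg.find("<|im_start|>", endoftext_pos + len("<|endoftext|>"))
--         if m != -1:
--             return m
--     # first marker at or after len(prev_msg) - 20, found directly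
--     start = max(0, len(prev_msg) - 20)
--     pos = full_msg.find("<|im_start|>", start)
--     return pos if pos != -1 else len(prev_msg)
-- ===== Notes on version B (the rewrite author's own statement) =====
-- stated objective: simpler
-- what changed: Instead of collecting every '<|im_start|>' position in a loop, sorting the list and scanning it for the first position >= len(prev_msg)-20, B issues one str.find with start max(0, len(prev_msg)-20) (and replaces the endoftext branch's slice-then-find by one find-with-start); this is exact because the marker cannot overlap itself, so the greedy collection misses no occurrence.
import Mathlib
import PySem

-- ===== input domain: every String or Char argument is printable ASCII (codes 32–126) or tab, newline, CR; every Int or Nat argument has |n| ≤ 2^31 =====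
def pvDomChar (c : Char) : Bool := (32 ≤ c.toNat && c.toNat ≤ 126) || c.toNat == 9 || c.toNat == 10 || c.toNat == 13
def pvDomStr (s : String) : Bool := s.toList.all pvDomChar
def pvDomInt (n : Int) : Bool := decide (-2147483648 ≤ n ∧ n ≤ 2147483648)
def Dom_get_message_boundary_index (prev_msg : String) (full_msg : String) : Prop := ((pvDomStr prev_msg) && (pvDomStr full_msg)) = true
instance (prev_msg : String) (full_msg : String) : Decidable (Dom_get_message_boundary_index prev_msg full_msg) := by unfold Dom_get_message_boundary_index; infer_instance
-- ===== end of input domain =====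

-- B replaces A's collect-all-markers loop + sort + linear scan by a single
-- str.find from max(0, len(prev_msg)-20) (and the endoftext branch's slice+find
-- by one find-with-start); same return value on every input (objective: simpler).

-- ===== PORT A =====

-- termination helper for the while-loop port (cited in decreasing_by)
theorem pvFindFrom_pos_le (full sub : List Char) (pos : Nat)
    (h : PySem.Chars.findFrom full sub (pos : Int) none ≠ -1) :
    pos ≤ full.length ∧ (pos : Int) ≤ PySem.Chars.findFrom full sub (pos : Int) none := by
  by_cases hl : pos ≤ full.length
  · exact ⟨hl, (PySem.Chars.findFrom_natCast_spec full sub pos hl h).1⟩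
  · exact absurd (by simp [PySem.Chars.findFrom]; omega) h

-- the inner `while True: pos = full_msg.find(marker, pos) ...` loop of A, with the
-- loop's single marker "<|im_start|>" (length 12), appending to the position list
def pvCollectA (full : List Char) (pos : Nat) (acc : List (Int × String)) :
    List (Int × String) :=
  let r := PySem.Chars.findFrom full "<|im_start|>".toList (pos : Int) none
  if h : r = -1 then acc
  else pvCollectA full (r.toNat + 12) (acc ++ [(r, "<|im_start|>")])
termination_by full.length + 1 - pos
decreasing_by
  have := pvFindFrom_pos_le full "<|im_start|>".toList pos h
  omega

-- A's final `for pos, marker in marker_positions: if pos >= threshold: return pos` scan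
def pvScanA (ps : List (Int × String)) (threshold : Int) (default_ : Int) : Int :=
  match ps with
  | [] => default_
  | (pos, _) :: rest => if threshold ≤ pos then pos else pvScanA rest threshold default_

-- port of A: the for-loop over the singleton boundary_markers = ["<|im_start|>"] is
-- unrolled; marker_positions.sort() is Python tuple sort, and every second component
-- is the same string "<|im_start|>", so keying on the first component is exact
def get_message_boundary_index (prev_msg : String) (full_msg : String) : Int :=
  if PySem.Str.len prev_msg = 0 then 0
  else
    let endoftext_pos := PySem.Str.find full_msg "<|endoftext|>"
    let body : Int :=
      let marker_positions := pvCollectA full_msg.toList 0 []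
      let sorted_positions := PySem.List.sorted marker_positions (fun p => p.1)
      let expected_prev_end := PySem.Str.len prev_msg
      let tolerance : Int := 20
      pvScanA sorted_positions (expected_prev_end - tolerance) (PySem.Str.len prev_msg)
    if endoftext_pos ≠ -1 then
      let after_endoftext :=
        PySem.Str.slice full_msg (some (endoftext_pos + PySem.Str.len "<|endoftext|>")) none
      let marker_in_new_conversation := PySem.Str.find after_endoftext "<|im_start|>"
      if marker_in_new_conversation ≠ -1 then
        endoftext_pos + PySem.Str.len "<|endoftext|>" + marker_in_new_conversation
      else body
    else body

-- ===== PORT B =====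
def get_message_boundary_index_alt (prev_msg : String) (full_msg : String) : Int :=
  if PySem.Str.len prev_msg = 0 then 0
  else
    let endoftext_pos := PySem.Str.find full_msg "<|endoftext|>"
    let body : Int :=
      let start := max 0 (PySem.Str.len prev_msg - 20)
      let pos := PySem.Str.findFrom full_msg "<|im_start|>" start none
      if pos ≠ -1 then pos else PySem.Str.len prev_msg
    if endoftext_pos ≠ -1 then
      let m := PySem.Str.findFrom full_msg "<|im_start|>"
        (endoftext_pos + PySem.Str.len "<|endoftext|>") none
      if m ≠ -1 then m else body
    else body

-- ===== PRECONDITION & SPEC =====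
def Spec_get_message_boundary_index (prev_msg : String) (full_msg : String) (out : Int) : Prop := out = get_message_boundary_index_alt prev_msg full_msg
instance (prev_msg : String) (full_msg : String) (out : Int) : Decidable (Spec_get_message_boundary_index prev_msg full_msg out) := by unfold Spec_get_message_boundary_index; infer_instance

-- ===== CLAIM (what is proved, stated in full; the proofs are below) =====
def Claim_equal_get_message_boundary_index : Prop := ∀ (prev_msg : String) (full_msg : String), Dom_get_message_boundary_index prev_msg full_msg → Spec_get_message_boundary_index prev_msg full_msg (get_message_boundary_index prev_msg full_msg)

-- ===== LEMMAS AND PROOFS =====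

-- one-step unfolding of the collecting loop
theorem pvCollectA_neg (s : List Char) (pos : Nat) (acc : List (Int × String))
    (hr : PySem.Chars.findFrom s "<|im_start|>".toList (pos : Int) none = -1) :
    pvCollectA s pos acc = acc := by
  rw [pvCollectA]
  simp only [hr, dite_true]

theorem pvCollectA_pos (s : List Char) (pos : Nat) (acc : List (Int × String))
    (hr : ¬ PySem.Chars.findFrom s "<|im_start|>".toList (pos : Int) none = -1) :
    pvCollectA s pos acc =
      pvCollectA s ((PySem.Chars.findFrom s "<|im_start|>".toList (pos : Int) none).toNat + 12)
        (acc ++ [(PySem.Chars.findFrom s "<|im_start|>".toList (pos : Int) none, "<|im_start|>")]) := by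
  rw [pvCollectA]
  simp only [hr, dite_false]

theorem pvFindFrom_ne_neg_one (s : List Char) (k o : Nat) (hk : k ≤ o)
    (ho : "<|im_start|>".toList <+: s.drop o) :
    PySem.Chars.findFrom s "<|im_start|>".toList (k : Int) none ≠ -1 := by
  have hMlen : ("<|im_start|>".toList).length = 12 := by decide
  have hol : o + 12 ≤ s.length := by
    have := ho.length_le; rw [hMlen, s.length_drop] at this; omega
  have hl : k ≤ s.length := by omega
  intro heq
  have hiff := PySem.Chars.findFrom_natCast_eq_neg_one_iff s "<|im_start|>".toList k hl
  apply hiff.mp heq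
  rw [← PySem.Chars.isIn_iff_infix, ← PySem.Chars.exists_prefix_drop_iff_isIn]
  exact ⟨o - k, by rw [List.drop_drop]; rwa [Nat.add_sub_cancel' hk]⟩

-- "<|im_start|>" cannot occur at two indices less than 12 apart ('<' occurs only at offset 0)
theorem pvNoOverlap (s : List Char) (o j : Nat)
    (ho : "<|im_start|>".toList <+: s.drop o) (hj : "<|im_start|>".toList <+: s.drop j)
    (hlt : o < j) : o + 12 ≤ j := by
  by_contra hc
  have hd : 0 < j - o ∧ j - o < 12 := by omega
  have hMlen : ("<|im_start|>".toList).length = 12 := by decide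
  have hlo : 12 ≤ (s.drop o).length := hMlen ▸ ho.length_le
  have hlj : 12 ≤ (s.drop j).length := hMlen ▸ hj.length_le
  have hso := s.length_drop (i := o)
  have hsj := s.length_drop (i := j)
  have h1 := ho.getElem (i := j - o) (by omega)
  have h0 := hj.getElem (i := 0) (by omega)
  simp only [List.getElem_drop] at h1 h0
  have he : o + (j - o) = j + 0 := by omega
  simp_rw [he] at h1
  have hcontra : ("<|im_start|>".toList)[j - o]'(by omega) = ("<|im_start|>".toList)[0]'(by omega) :=
    h1.trans h0.symm
  have hne : ∀ d, d < 12 → 0 < d → ("<|im_start|>".toList)[d]! ≠ ("<|im_start|>".toList)[0]! := by decide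
  have := hne (j - o) (by omega) (by omega)
  rw [getElem!_pos _ _ (by omega), getElem!_pos _ _ (by omega)] at this
  exact this hcontra

theorem pvOcc_len (s : List Char) (o : Nat) (ho : "<|im_start|>".toList <+: s.drop o) :
    o + 12 ≤ s.length := by
  have hMlen : ("<|im_start|>".toList).length = 12 := by decide
  have := ho.length_le
  rw [hMlen, s.length_drop] at this
  omega

-- the loop's accumulator only ever receives appends; the collected positions increase
theorem pvCollectA_acc (s : List Char) : ∀ n pos acc, s.length + 1 - pos ≤ n →
    pvCollectA s pos acc = acc ++ pvCollectA s pos [] := by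
  intro n
  induction n with
  | zero =>
    intro pos acc h
    have hr : PySem.Chars.findFrom s "<|im_start|>".toList (pos : Int) none = -1 := by
      by_contra hr
      have := pvFindFrom_pos_le s _ pos hr
      omega
    rw [pvCollectA_neg s pos acc hr, pvCollectA_neg s pos [] hr, List.append_nil]
  | succ n ih =>
    intro pos acc h
    by_cases hr : PySem.Chars.findFrom s "<|im_start|>".toList (pos : Int) none = -1
    · rw [pvCollectA_neg s pos acc hr, pvCollectA_neg s pos [] hr, List.append_nil]
    · have hb := pvFindFrom_pos_le s _ pos hr
      rw [pvCollectA_pos s pos acc hr, pvCollectA_pos s pos [] hr]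
      rw [ih _ _ (by omega), ih _ ([] ++ [_]) (by omega)]
      simp

theorem pvCollectA_lb_pairwise (s : List Char) : ∀ n pos, s.length + 1 - pos ≤ n →
    (∀ p ∈ pvCollectA s pos [], (pos : Int) ≤ p.1) ∧
    (pvCollectA s pos []).Pairwise (fun a b => a.1 < b.1) := by
  intro n
  induction n with
  | zero =>
    intro pos h
    have hr : PySem.Chars.findFrom s "<|im_start|>".toList (pos : Int) none = -1 := by
      by_contra hr
      have := pvFindFrom_pos_le s _ pos hr
      omega
    rw [pvCollectA_neg s pos [] hr]
    simp
  | succ n ih =>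
    intro pos h
    by_cases hr : PySem.Chars.findFrom s "<|im_start|>".toList (pos : Int) none = -1
    · rw [pvCollectA_neg s pos [] hr]; simp
    · have hb := pvFindFrom_pos_le s _ pos hr
      set r := PySem.Chars.findFrom s "<|im_start|>".toList (pos : Int) none with hrdef
      rw [pvCollectA_pos s pos [] hr]
      rw [pvCollectA_acc s n (r.toNat + 12) _ (by omega)]
      have ihh := ih (r.toNat + 12) (by omega)
      constructor
      · intro p hp
        simp only [List.nil_append, List.singleton_append, List.mem_cons] at hp
        rcases hp with hp | hp
        · rw [hp]; exact hb.2
        · have := ihh.1 p hp; omega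
      · simp only [List.nil_append, List.singleton_append, List.pairwise_cons]
        refine ⟨fun b hb2 => ?_, ihh.2⟩
        have := ihh.1 b hb2
        omega

-- the heart of the equivalence: A's scan over the greedily collected positions is
-- exactly B's single find from the threshold
theorem pvScanCollect (s : List Char) (t d : Int) : ∀ n pos, s.length + 1 - pos ≤ n →
    (∀ j, t.toNat ≤ j → j < pos → ¬ "<|im_start|>".toList <+: s.drop j) →
    pvScanA (pvCollectA s pos []) t d =
      (if PySem.Chars.findFrom s "<|im_start|>".toList ((t.toNat : Nat) : Int) none = -1 then d
       else PySem.Chars.findFrom s "<|im_start|>".toList ((t.toNat : Nat) : Int) none) := by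
  intro n
  induction n with
  | zero =>
    intro pos h hinv
    have hr : PySem.Chars.findFrom s "<|im_start|>".toList (pos : Int) none = -1 := by
      by_contra hr
      have := pvFindFrom_pos_le s _ pos hr
      omega
    have hF : PySem.Chars.findFrom s "<|im_start|>".toList ((t.toNat : Nat) : Int) none = -1 := by
      by_contra hF
      by_cases hkl : t.toNat ≤ s.length
      · have hs := PySem.Chars.findFrom_natCast_spec s _ t.toNat hkl hF
        have hocc := hs.2.1
        have hol := pvOcc_len s _ hocc
        exact hinv _ (by omega) (by omega) hocc
      · have := pvFindFrom_pos_le s "<|im_start|>".toList t.toNat hF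
        omega
    rw [pvCollectA_neg s pos [] hr]
    simp only [pvScanA]
    rw [if_pos hF]
  | succ n ih =>
    intro pos h hinv
    by_cases hr : PySem.Chars.findFrom s "<|im_start|>".toList (pos : Int) none = -1
    · have hF : PySem.Chars.findFrom s "<|im_start|>".toList ((t.toNat : Nat) : Int) none = -1 := by
        by_contra hF
        by_cases hkl : t.toNat ≤ s.length
        · have hs := PySem.Chars.findFrom_natCast_spec s _ t.toNat hkl hF
          have hocc := hs.2.1
          have hol := pvOcc_len s _ hocc
          set o := (PySem.Chars.findFrom s "<|im_start|>".toList ((t.toNat : Nat) : Int) none).toNat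
          by_cases hop : o < pos
          · exact hinv o (by omega) hop hocc
          · exact pvFindFrom_ne_neg_one s pos o (by omega) hocc hr
        · have := pvFindFrom_pos_le s "<|im_start|>".toList t.toNat hF
          omega
      rw [pvCollectA_neg s pos [] hr]
      simp only [pvScanA]
      rw [if_pos hF]
    · have hb := pvFindFrom_pos_le s _ pos hr
      set r := PySem.Chars.findFrom s "<|im_start|>".toList (pos : Int) none with hrdef
      have hspec := PySem.Chars.findFrom_natCast_spec s _ pos hb.1 hr
      have hocc : "<|im_start|>".toList <+: s.drop r.toNat := hspec.2.1
      have hmin := hspec.2.2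
      have hol := pvOcc_len s _ hocc
      rw [pvCollectA_pos s pos [] hr]
      rw [pvCollectA_acc s n (r.toNat + 12) _ (by omega)]
      simp only [List.nil_append, List.singleton_append]
      simp only [pvScanA]
      rw [← hrdef]
      by_cases hthr : t ≤ r
      · simp only [if_pos hthr]
        have hkr : t.toNat ≤ r.toNat := by omega
        have hF : PySem.Chars.findFrom s "<|im_start|>".toList ((t.toNat : Nat) : Int) none ≠ -1 :=
          pvFindFrom_ne_neg_one s t.toNat r.toNat hkr hocc
        rw [if_neg hF]
        have hkl : t.toNat ≤ s.length := by omega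
        have hsF := PySem.Chars.findFrom_natCast_spec s _ t.toNat hkl hF
        set F := PySem.Chars.findFrom s "<|im_start|>".toList ((t.toNat : Nat) : Int) none with hFdef
        have hFocc := hsF.2.1
        have hFol := pvOcc_len s _ hFocc
        have h1 : r.toNat ≤ F.toNat := by
          by_contra hlt2
          by_cases hFp : F.toNat < pos
          · exact hinv F.toNat (by omega) hFp hFocc
          · exact hmin F.toNat (by omega) (by omega) hFocc
        have h2 : F.toNat ≤ r.toNat := by
          by_contra hlt2
          exact hsF.2.2 r.toNat hkr (by omega) hocc
        omega
      · simp only [if_neg hthr]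
        apply ih (r.toNat + 12) (by omega)
        intro j hjk hj2
        by_cases hjp : j < pos
        · exact hinv j hjk hjp
        · intro hjocc
          by_cases hjr : j < r.toNat
          · exact hmin j (by omega) hjr hjocc
          · by_cases hje : j = r.toNat
            · omega
            · have := pvNoOverlap s r.toNat j hocc hjocc (by omega)
              omega

theorem pvBody_eq (prev full : String) :
    pvScanA (PySem.List.sorted (pvCollectA full.toList 0 []) (fun p => p.1))
        (PySem.Str.len prev - 20) (PySem.Str.len prev) =
      (if PySem.Str.findFrom full "<|im_start|>" (max 0 (PySem.Str.len prev - 20)) none ≠ -1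
       then PySem.Str.findFrom full "<|im_start|>" (max 0 (PySem.Str.len prev - 20)) none
       else PySem.Str.len prev) := by
  have hpw := (pvCollectA_lb_pairwise full.toList (full.toList.length + 1) 0 (by omega)).2
  rw [PySem.List.sorted_eq_of_perm_of_pairwise_lt _ _ _ (List.Perm.refl _) hpw]
  set t := PySem.Str.len prev - 20 with ht
  have hmax : max 0 t = ((t.toNat : Nat) : Int) := by rw [Int.toNat_eq_max, max_comm]
  rw [PySem.Str.findFrom_eq, hmax]
  rw [pvScanCollect full.toList t (PySem.Str.len prev) (full.toList.length + 1) 0 (by omega)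
      (fun j _ hj => absurd hj (by omega))]
  by_cases hF : PySem.Chars.findFrom full.toList "<|im_start|>".toList ((t.toNat : Nat) : Int) none = -1
  · rw [if_pos hF, if_neg (not_not_intro hF)]
  · rw [if_neg hF, if_pos hF]

theorem pv_main : ∀ (prev_msg : String) (full_msg : String),
    get_message_boundary_index prev_msg full_msg = get_message_boundary_index_alt prev_msg full_msg := by
  intro prev full
  unfold get_message_boundary_index get_message_boundary_index_alt
  by_cases hp : PySem.Str.len prev = 0
  · simp only [if_pos hp]
  · simp only [if_neg hp]
    by_cases he : PySem.Str.find full "<|endoftext|>" ≠ -1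
    · simp only [if_pos he]
      set ep := PySem.Str.find full "<|endoftext|>" with hepdef
      have hep0 : 0 ≤ ep := by
        have := PySem.Chars.neg_one_le_find full.toList "<|endoftext|>".toList
        rw [PySem.Str.find_eq] at hepdef
        omega
      have hlen13 : PySem.Str.len "<|endoftext|>" = 13 := by decide
      have hepf : PySem.Chars.find full.toList "<|endoftext|>".toList = ep := by
        rw [hepdef, PySem.Str.find_eq]
      have hocc : "<|endoftext|>".toList <+: full.toList.drop ep.toNat := by
        have := (PySem.Chars.find_spec (s := full.toList) (sub := "<|endoftext|>".toList)
          (by rw [hepf]; omega)).1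
        rwa [hepf] at this
      have hropl : ep.toNat + 13 ≤ full.toList.length := by
        have h1 := hocc.length_le
        have h2 : ("<|endoftext|>".toList).length = 13 := by decide
        rw [h2, List.length_drop] at h1
        omega
      have hkcast : (((ep + 13).toNat : Nat) : Int) = ep + 13 := by omega
      have hk : (ep + 13).toNat ≤ full.toList.length := by omega
      have hslice : (PySem.Str.slice full (some (ep + PySem.Str.len "<|endoftext|>")) none).toList
          = full.toList.drop (ep + 13).toNat := by
        rw [hlen13, PySem.Str.toList_slice]
        simp only [PySem.Chars.slice_eq_listSlice]
        rw [PySem.List.slice_from _ (by omega)]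
      have hA : PySem.Str.find (PySem.Str.slice full (some (ep + PySem.Str.len "<|endoftext|>")) none) "<|im_start|>"
          = PySem.Chars.find (full.toList.drop (ep + 13).toNat) "<|im_start|>".toList := by
        rw [PySem.Str.find_eq, hslice]
      set mA := PySem.Chars.find (full.toList.drop (ep + 13).toNat) "<|im_start|>".toList with hmAdef
      have hmAge : -1 ≤ mA := PySem.Chars.neg_one_le_find _ _
      have hB : PySem.Str.findFrom full "<|im_start|>" (ep + PySem.Str.len "<|endoftext|>") none
          = if mA = -1 then -1 else ep + 13 + mA := by
        rw [hlen13, PySem.Str.findFrom_eq]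
        have hnc := PySem.Chars.findFrom_natCast full.toList "<|im_start|>".toList (ep + 13).toNat hk
        rw [hkcast] at hnc
        rw [hnc, hmAdef]
      rw [hA, hB]
      by_cases hmA : mA = -1
      · rw [if_pos hmA]
        simp only [hmA, ne_eq, not_true_eq_false, ite_false]
        exact pvBody_eq prev full
      · rw [if_neg hmA]
        have h1 : ep + 13 + mA ≠ -1 := by omega
        rw [if_pos hmA, if_pos h1, hlen13]
    · simp only [if_neg he]
      exact pvBody_eq prev full

-- ===== VERDICT (by name: the statement is the Claim_ definition above) =====
theorem get_message_boundary_index_spec : Claim_equal_get_message_boundary_index := by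
  intro prev_msg full_msg _
  unfold Spec_get_message_boundary_index
  exact pv_main prev_msg full_msg
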